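-- pv_equiv track=rewrite | github.com/brandonlepine/smi | scripts/repair_manifest.py | find_stem_offset
-- ===== SOURCE A (Python) =====
-- def find_stem_offset(full_ids, stem_ids):
--     for start in range(len(full_ids) - len(stem_ids) + 1):
--         if full_ids[start:start + len(stem_ids)] == stem_ids:
--             return start
--     for trim in range(1, min(5, len(stem_ids))):
--         sub = stem_ids[trim:]
--         for start in range(len(full_ids) - len(sub) + 1):
--             if full_ids[start:start + len(sub)] == sub:
--                 return start - trim
--     return None
-- ===== SOURCE B (Python) =====
-- _MOD = (1 << 61) - 1
-- _BASE = 1000003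
--
--
-- def _poly_hash(xs):
--     h = 0
--     for x in xs:
--         h = (h * _BASE + x) % _MOD
--     return h
--
--
-- def _rk_search(text, pat):
--     # Rabin-Karp: first index where pat occurs in text, else None.
--     # Exact: a rolling-hash hit is verified by a direct comparison, and
--     # equal windows always have equal hashes, so no occurrence is skipped.
--     m = len(pat)
--     n = len(text)
--     if m > n:
--         return None
--     hp = _poly_hash(pat)
--     hw = _poly_hash(text[:m])
--     pm = 1
--     for _ in range(m):
--         pm = pm * _BASE % _MOD
--     start = 0
--     while True:
--         if hw == hp and text[start:start + m] == pat:
--             return start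
--         if start + m >= n:
--             return None
--         hw = (hw * _BASE + text[start + m] - text[start] * pm) % _MOD
--         start += 1
--
--
-- def find_stem_offset(full_ids, stem_ids):
--     for trim in range(max(1, min(5, len(stem_ids)))):
--         pos = _rk_search(full_ids, stem_ids[trim:])
--         if pos is not None:
--             return pos - trim
--     return None
-- ===== Notes on version B (the rewrite author's own statement) =====
-- stated objective: alternative
-- what changed: A naive-scans every start position comparing a freshly built length-m slice per phase; B is Rabin-Karp: each phase searches with an O(1)-update rolling polynomial hash and compares the actual window only on a hash hit (exact, since equal windows always have equal hashes).
import Mathlib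
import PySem

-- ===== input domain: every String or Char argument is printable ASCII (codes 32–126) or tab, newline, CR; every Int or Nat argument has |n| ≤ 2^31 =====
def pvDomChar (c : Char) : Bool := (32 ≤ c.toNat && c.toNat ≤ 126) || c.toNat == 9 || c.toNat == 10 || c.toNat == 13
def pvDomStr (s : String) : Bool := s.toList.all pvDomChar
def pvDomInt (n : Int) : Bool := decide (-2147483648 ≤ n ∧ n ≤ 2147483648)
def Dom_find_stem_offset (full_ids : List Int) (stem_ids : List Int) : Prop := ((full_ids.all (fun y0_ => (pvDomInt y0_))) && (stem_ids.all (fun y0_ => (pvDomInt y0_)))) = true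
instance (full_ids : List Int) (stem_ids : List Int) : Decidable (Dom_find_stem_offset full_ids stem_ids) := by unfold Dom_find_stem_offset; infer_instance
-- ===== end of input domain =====

-- B replaces A's per-position slice comparisons by Rabin-Karp rolling-hash search; exact because every hash hit is verified and equal windows always hash equal (alternative algorithm).


-- ===== PORT A =====
-- inner 'for start in range(...)' loop of A, with its early return
def pvA_scan (full_ids : List Int) (sub : List Int) : List Int → Option Int
  | [] => none
  | s :: rest =>
    if PySem.List.slice full_ids (some s) (some (s + (sub.length : Int))) == sub then some s
    else pvA_scan full_ids sub rest

-- trim loop 'for trim in range(1, min(5, len(stem_ids)))' of A, with its early return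
def pvA_trims (full_ids : List Int) (stem_ids : List Int) : List Int → Option Int
  | [] => none
  | t :: rest =>
    let sub := PySem.List.slice stem_ids (some t) none
    match pvA_scan full_ids sub (PySem.List.pyRange 0 ((full_ids.length : Int) - (sub.length : Int) + 1) 1) with
    | some s => some (s - t)
    | none => pvA_trims full_ids stem_ids rest

def find_stem_offset (full_ids : List Int) (stem_ids : List Int) : Option Int :=
  match pvA_scan full_ids stem_ids
      (PySem.List.pyRange 0 ((full_ids.length : Int) - (stem_ids.length : Int) + 1) 1) with
  | some s => some s
  | none =>
    pvA_trims full_ids stem_ids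
      (PySem.List.pyRange 1 (min 5 (stem_ids.length : Int)) 1)

-- ===== PORT B =====
def pvMOD : Int := 2305843009213693951   -- (1 << 61) - 1
def pvBASE : Int := 1000003

-- B's _poly_hash
def pvPolyHash (xs : List Int) : Int :=
  xs.foldl (fun h x => PySem.Int.mod (h * pvBASE + x) pvMOD) 0

-- B's 'pm = 1; for _ in range(m): pm = pm * _BASE % _MOD'
def pvPowm (m : Nat) : Int :=
  (List.range m).foldl (fun p _ => PySem.Int.mod (p * pvBASE) pvMOD) 1

-- B's 'while True' loop of _rk_search: roll the window hash, verify on a hash hit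
def pvRkLoop (text pat : List Int) (hp pm : Int) (start : Nat) (hw : Int) : Option Int :=
  if hw == hp && PySem.List.slice text (some (start : Int)) (some ((start : Int) + (pat.length : Int))) == pat then
    some (start : Int)
  else if _h : (start : Int) + (pat.length : Int) ≥ (text.length : Int) then none
  else
    pvRkLoop text pat hp pm (start + 1)
      (PySem.Int.mod (hw * pvBASE + PySem.List.pyGetD text ((start : Int) + (pat.length : Int)) 0
        - PySem.List.pyGetD text (start : Int) 0 * pm) pvMOD)
termination_by text.length - start
decreasing_by omega

-- B's _rk_search
def pvRkSearch (text pat : List Int) : Option Int :=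
  if (pat.length : Int) > (text.length : Int) then none
  else
    pvRkLoop text pat (pvPolyHash pat) (pvPowm pat.length) 0
      (pvPolyHash (PySem.List.slice text none (some (pat.length : Int))))

-- B's 'for trim in range(max(1, min(5, len(stem_ids))))' loop
def pvB_go (full_ids : List Int) (stem_ids : List Int) (trim phases : Nat) : Option Int :=
  if _h : trim < phases then
    match pvRkSearch full_ids (PySem.List.slice stem_ids (some (trim : Int)) none) with
    | some pos => some (pos - (trim : Int))
    | none => pvB_go full_ids stem_ids (trim + 1) phases
  else none
termination_by phases - trim

def find_stem_offset_alt (full_ids : List Int) (stem_ids : List Int) : Option Int :=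
  pvB_go full_ids stem_ids 0 (max 1 (min 5 stem_ids.length))

-- ===== PRECONDITION & SPEC =====
def Spec_find_stem_offset (full_ids : List Int) (stem_ids : List Int) (out : Option Int) : Prop := out = find_stem_offset_alt full_ids stem_ids
instance (full_ids : List Int) (stem_ids : List Int) (out : Option Int) : Decidable (Spec_find_stem_offset full_ids stem_ids out) := by unfold Spec_find_stem_offset; infer_instance

-- ===== CLAIM (what is proved, stated in full; the proofs are below) =====
def Claim_equal_find_stem_offset : Prop := ∀ (full_ids : List Int) (stem_ids : List Int), Dom_find_stem_offset full_ids stem_ids → Spec_find_stem_offset full_ids stem_ids (find_stem_offset full_ids stem_ids)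

-- ===== LEMMAS AND PROOFS =====

-- the unreduced polynomial value over the integers
def pvHraw (xs : List Int) : Int := xs.foldl (fun h x => h * pvBASE + x) 0

theorem pvMOD_pos : (0 : Int) < pvMOD := by decide

theorem pvHash_foldl (l : List Int) : ∀ h : Int,
    l.foldl (fun h x => PySem.Int.mod (h * pvBASE + x) pvMOD) (PySem.Int.mod h pvMOD)
      = PySem.Int.mod (l.foldl (fun h x => h * pvBASE + x) h) pvMOD := by
  induction l with
  | nil => intro h; rfl
  | cons a t ih =>
    intro h
    simp only [List.foldl_cons]
    have hc : PySem.Int.mod (PySem.Int.mod h pvMOD * pvBASE + a) pvMOD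
        = PySem.Int.mod (h * pvBASE + a) pvMOD := by
      rw [PySem.Int.mod_eq_emod_of_pos pvMOD_pos, PySem.Int.mod_eq_emod_of_pos pvMOD_pos,
          PySem.Int.mod_eq_emod_of_pos pvMOD_pos]
      have h1 : h % pvMOD ≡ h [ZMOD pvMOD] := Int.emod_emod_of_dvd h dvd_rfl
      exact (h1.mul_right pvBASE).add_right a
    rw [hc]
    exact ih (h * pvBASE + a)

theorem pvHash_eq (xs : List Int) : pvPolyHash xs = PySem.Int.mod (pvHraw xs) pvMOD := by
  have h := pvHash_foldl xs 0
  rw [show PySem.Int.mod 0 pvMOD = 0 by decide] at h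
  exact h

theorem pvPowm_eq (m : Nat) : pvPowm m = PySem.Int.mod (pvBASE ^ m) pvMOD := by
  induction m with
  | zero => decide
  | succ n ih =>
    unfold pvPowm
    rw [List.range_succ, List.foldl_append]
    show PySem.Int.mod (pvPowm n * pvBASE) pvMOD = _
    rw [ih, PySem.Int.mod_eq_emod_of_pos pvMOD_pos, PySem.Int.mod_eq_emod_of_pos pvMOD_pos,
        PySem.Int.mod_eq_emod_of_pos pvMOD_pos]
    have h1 : pvBASE ^ n % pvMOD ≡ pvBASE ^ n [ZMOD pvMOD] := Int.emod_emod_of_dvd _ dvd_rfl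
    calc (pvBASE ^ n % pvMOD * pvBASE) % pvMOD
        = (pvBASE ^ n * pvBASE) % pvMOD := h1.mul_right pvBASE
      _ = pvBASE ^ (n + 1) % pvMOD := by rw [pow_succ]

theorem pvHraw_foldl (t : List Int) : ∀ h : Int,
    t.foldl (fun h x => h * pvBASE + x) h = h * pvBASE ^ t.length + pvHraw t := by
  induction t with
  | nil => intro h; simp [pvHraw]
  | cons a t ih =>
    intro h
    have hcons : pvHraw (a :: t) = a * pvBASE ^ t.length + pvHraw t := by
      have hr : pvHraw (a :: t) = t.foldl (fun h x => h * pvBASE + x) (0 * pvBASE + a) := rfl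
      rw [hr, ih (0 * pvBASE + a), zero_mul, zero_add]
    simp only [List.foldl_cons, List.length_cons]
    rw [ih (h * pvBASE + a), hcons, pow_succ]
    ring

theorem pvHraw_append_singleton (w : List Int) (c : Int) :
    pvHraw (w ++ [c]) = pvHraw w * pvBASE + c := by
  unfold pvHraw; rw [List.foldl_append]; rfl

theorem pvHraw_cons (a : Int) (t : List Int) :
    pvHraw (a :: t) = a * pvBASE ^ t.length + pvHraw t := by
  have hr : pvHraw (a :: t) = t.foldl (fun h x => h * pvBASE + x) (0 * pvBASE + a) := rfl
  rw [hr, pvHraw_foldl t (0 * pvBASE + a), zero_mul, zero_add]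

-- rolling update: the hash of the next window from the hash of the current one
theorem pvRoll (text : List Int) (m s : Nat) (hm : 1 ≤ m) (hs : s + m < text.length) :
    PySem.Int.mod (pvPolyHash ((text.drop s).take m) * pvBASE
        + PySem.List.pyGetD text ((s : Int) + (m : Int)) 0
        - PySem.List.pyGetD text (s : Int) 0 * pvPowm m) pvMOD
      = pvPolyHash ((text.drop (s + 1)).take m) := by
  obtain ⟨k, rfl⟩ : ∃ k, m = k + 1 := ⟨m - 1, by omega⟩
  have hslen : s < text.length := by omega
  have hsm : s + (k + 1) < text.length := hs
  have htlen : ((text.drop (s + 1)).take k).length = k := by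
    rw [List.length_take, List.length_drop]; omega
  -- current window = text[s] :: t
  have hwin : (text.drop s).take (k + 1) = text[s] :: (text.drop (s + 1)).take k := by
    rw [List.drop_eq_getElem_cons hslen, List.take_succ_cons]
  -- next window = t ++ [text[s + 1 + k]]
  have hwin' : (text.drop (s + 1)).take (k + 1)
      = (text.drop (s + 1)).take k ++ [text[s + 1 + k]] := by
    rw [List.take_add_one, List.getElem?_drop,
        List.getElem?_eq_getElem (show s + 1 + k < text.length by omega)]
    simp only [Option.toList_some]
  have hg1 : PySem.List.pyGetD text ((s : Int) + ((k + 1 : Nat) : Int)) 0 = text[s + 1 + k] := by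
    rw [show ((s : Int) + ((k + 1 : Nat) : Int)) = ((s + 1 + k : Nat) : Int) by push_cast; ring,
        PySem.List.pyGetD_natCast, List.getD_eq_getElem text 0 (by omega)]
  have hg2 : PySem.List.pyGetD text (s : Int) 0 = text[s] := by
    rw [PySem.List.pyGetD_natCast, List.getD_eq_getElem text 0 hslen]
  rw [hg1, hg2, hwin, hwin', pvHash_eq, pvHash_eq, pvPowm_eq]
  rw [pvHraw_cons, pvHraw_append_singleton, htlen]
  rw [PySem.Int.mod_eq_emod_of_pos pvMOD_pos, PySem.Int.mod_eq_emod_of_pos pvMOD_pos,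
      PySem.Int.mod_eq_emod_of_pos pvMOD_pos, PySem.Int.mod_eq_emod_of_pos pvMOD_pos]
  set t := (text.drop (s + 1)).take k
  have h1 : (text[s] * pvBASE ^ k + pvHraw t) % pvMOD
      ≡ text[s] * pvBASE ^ k + pvHraw t [ZMOD pvMOD] := Int.emod_emod_of_dvd _ dvd_rfl
  have h2 : pvBASE ^ (k + 1) % pvMOD ≡ pvBASE ^ (k + 1) [ZMOD pvMOD] := Int.emod_emod_of_dvd _ dvd_rfl
  have h3 : (text[s] * pvBASE ^ k + pvHraw t) % pvMOD * pvBASE + text[s + 1 + k]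
        - text[s] * (pvBASE ^ (k + 1) % pvMOD)
      ≡ (text[s] * pvBASE ^ k + pvHraw t) * pvBASE + text[s + 1 + k]
        - text[s] * pvBASE ^ (k + 1) [ZMOD pvMOD] :=
    ((h1.mul_right pvBASE).add_right _).sub (h2.mul_left _)
  calc ((text[s] * pvBASE ^ k + pvHraw t) % pvMOD * pvBASE + text[s + 1 + k]
        - text[s] * (pvBASE ^ (k + 1) % pvMOD)) % pvMOD
      = ((text[s] * pvBASE ^ k + pvHraw t) * pvBASE + text[s + 1 + k]
        - text[s] * pvBASE ^ (k + 1)) % pvMOD := h3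
    _ = (pvHraw t * pvBASE + text[s + 1 + k]) % pvMOD := by
        congr 1
        rw [pow_succ]
        ring

-- the per-position test of B agrees with A's slice comparison
theorem pvCond_eq (text pat : List Int) (p : Nat) :
    ((pvPolyHash ((text.drop p).take pat.length) == pvPolyHash pat)
      && (PySem.List.slice text (some (p : Int)) (some ((p : Int) + (pat.length : Int))) == pat))
    = (PySem.List.slice text (some (p : Int)) (some ((p : Int) + (pat.length : Int))) == pat) := by
  rw [PySem.List.slice_natCast_add]
  by_cases h : (text.drop p).take pat.length = pat
  · simp [h]
  · simp [h]

-- B's rolling loop computes exactly A's naive scan over the remaining start positions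
theorem pvRk_eq (full sub : List Int) :
    ∀ (fuel p : Nat), full.length + 1 - p ≤ fuel → p + sub.length ≤ full.length →
      pvA_scan full sub (PySem.List.pyRange (p : Int) ((full.length : Int) - (sub.length : Int) + 1) 1)
        = pvRkLoop full sub (pvPolyHash sub) (pvPowm sub.length) p
            (pvPolyHash ((full.drop p).take sub.length)) := by
  intro fuel
  induction fuel with
  | zero => intro p hf hp; omega
  | succ n ih =>
    intro p hf hp
    rw [pvRkLoop]
    rw [pvCond_eq full sub p]
    rw [PySem.List.pyRange_one_cons (by omega)]
    simp only [pvA_scan]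
    by_cases hmatch : PySem.List.slice full (some (p : Int)) (some ((p : Int) + (sub.length : Int))) == sub
    · simp [hmatch]
    · simp only [hmatch, Bool.false_eq_true, if_false]
      by_cases hend : (p : Int) + (sub.length : Int) ≥ (full.length : Int)
      · rw [dif_pos hend]
        have hr : PySem.List.pyRange ((p : Int) + 1) ((full.length : Int) - (sub.length : Int) + 1) 1 = [] := by
          apply PySem.List.pyRange_one_eq_nil; omega
        rw [hr]
        rfl
      · rw [dif_neg hend]
        have hm1 : 1 ≤ sub.length := by
          by_contra hc
          have hz : sub.length = 0 := by omega
          apply hmatch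
          rw [PySem.List.slice_natCast_add]
          simp [List.eq_nil_of_length_eq_zero hz]
        have hlt : p + sub.length < full.length := by omega
        rw [pvRoll full sub.length p hm1 hlt]
        rw [show ((p : Int) + 1) = ((p + 1 : Nat) : Int) by push_cast; ring]
        exact ih (p + 1) (by omega) (by omega)

-- search level: A's range scan equals B's _rk_search
theorem pvSearch_eq (full sub : List Int) :
    pvA_scan full sub (PySem.List.pyRange 0 ((full.length : Int) - (sub.length : Int) + 1) 1)
      = pvRkSearch full sub := by
  unfold pvRkSearch
  by_cases hbig : (sub.length : Int) > (full.length : Int)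
  · rw [if_pos hbig]
    have hr : PySem.List.pyRange 0 ((full.length : Int) - (sub.length : Int) + 1) 1 = [] := by
      apply PySem.List.pyRange_one_eq_nil; omega
    rw [hr]
    rfl
  · rw [if_neg hbig]
    rw [PySem.List.slice_to_natCast]
    have h0 : (0 : Int) = ((0 : Nat) : Int) := rfl
    rw [h0, pvRk_eq full sub (full.length + 1) 0 (by omega) (by omega)]
    simp

-- trim loops of A and B coincide
theorem pvTrims_eq (full stem : List Int) :
    ∀ (t phases : Nat),
      pvA_trims full stem (PySem.List.pyRange (t : Int) (phases : Int) 1)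
        = pvB_go full stem t phases := by
  intro t phases
  induction hfuel : phases - t generalizing t with
  | zero =>
    have hr : PySem.List.pyRange (t : Int) (phases : Int) 1 = [] := by
      apply PySem.List.pyRange_one_eq_nil; omega
    rw [hr, pvB_go, dif_neg (by omega)]
    simp only [pvA_trims]
  | succ n ih =>
    have htp : t < phases := by omega
    rw [PySem.List.pyRange_one_cons (by omega)]
    simp only [pvA_trims]
    rw [pvB_go, dif_pos htp]
    rw [pvSearch_eq full (PySem.List.slice stem (some (t : Int)) none)]
    cases hsc : pvRkSearch full (PySem.List.slice stem (some (t : Int)) none) with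
    | some s => rfl
    | none =>
      rw [show ((t : Int) + 1) = ((t + 1 : Nat) : Int) by push_cast; ring]
      exact ih (t + 1) (by omega)

-- ===== VERDICT (by name: the statement is the Claim_ definition above) =====
theorem find_stem_offset_spec : Claim_equal_find_stem_offset := by
  intro full stem _
  unfold Spec_find_stem_offset find_stem_offset find_stem_offset_alt
  rw [pvSearch_eq full stem]
  rw [pvB_go, dif_pos (by omega)]
  have hs0 : PySem.List.slice stem (some ((0 : Nat) : Int)) none = stem := by
    rw [PySem.List.slice_from_natCast]; simp
  rw [hs0]
  cases hsc : pvRkSearch full stem with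
  | some s => simp
  | none =>
    simp only []
    by_cases hm : stem.length = 0
    · have h1 : PySem.List.pyRange 1 (min 5 (stem.length : Int)) 1 = [] := by
        apply PySem.List.pyRange_one_eq_nil; omega
      rw [h1]
      have h2 : max 1 (min 5 stem.length) = 1 := by omega
      rw [h2, pvB_go, dif_neg (by omega)]
      rfl
    · have h2 : max 1 (min 5 stem.length) = min 5 stem.length := by omega
      rw [h2]
      have h3 : (min 5 (stem.length : Int)) = ((min 5 stem.length : Nat) : Int) := by
        push_cast; omega
      rw [h3, show (1 : Int) = ((1 : Nat) : Int) by norm_num]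
      exact pvTrims_eq full stem 1 (min 5 stem.length)
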